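-- pv_equiv track=rewrite | github.com/Aruk0903/Python-Programs | Maximum Positive Prefixes.py | maxPosPrefixes
-- ===== SOURCE A (Python) =====
-- def maxPosPrefixes(arr):
--     pos,neg,new,ans,only_pos,pos_count=[],[],[],[],[],0
--     pos = [num for num in arr if num > 0]
--     neg = [num for num in arr if num <= 0]
--     pos.sort()
--     neg.sort(reverse=True)
--     new=pos+neg
--     ans = [sum(new[ : i + 1]) for i in range(len(new))]
--     only_pos = [num for num in ans if num > 0]
--     pos_count = len(only_pos)
--     return pos_count
--
-- arr = [-3,0,2,1]
-- ===== SOURCE B (Python) =====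
-- def maxPosPrefixes(arr):
--     new = sorted(x for x in arr if x > 0) + sorted((x for x in arr if x <= 0), reverse=True)
--     run = 0
--     count = 0
--     for x in new:
--         run += x
--         if run > 0:
--             count += 1
--     return count
-- ===== Notes on version B (the rewrite author's own statement) =====
-- stated objective: faster
-- what changed: B keeps a single running-sum accumulator in one pass over the reordered list instead of re-summing every prefix slice (and drops the separate filter/count passes).
import Mathlib
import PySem

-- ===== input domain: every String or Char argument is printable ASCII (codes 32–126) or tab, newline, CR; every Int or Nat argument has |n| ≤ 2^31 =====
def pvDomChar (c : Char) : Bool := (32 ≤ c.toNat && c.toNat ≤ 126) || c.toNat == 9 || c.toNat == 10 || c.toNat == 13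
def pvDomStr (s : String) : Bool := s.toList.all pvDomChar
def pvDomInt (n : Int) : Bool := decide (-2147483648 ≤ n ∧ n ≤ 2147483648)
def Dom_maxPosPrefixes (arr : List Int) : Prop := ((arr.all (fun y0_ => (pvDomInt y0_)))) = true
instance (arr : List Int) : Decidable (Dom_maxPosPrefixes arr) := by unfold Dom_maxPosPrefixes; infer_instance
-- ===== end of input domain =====

-- B replaces A's per-prefix re-summation by one running-sum pass; objective: faster (asymptotic).

-- ===== PORT A =====
def maxPosPrefixes (arr : List Int) : Int :=
  let pos := PySem.List.sorted (arr.filter (fun num => decide (num > 0))) (fun x => x) false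
  let neg := PySem.List.sorted (arr.filter (fun num => decide (num ≤ 0))) (fun x => x) true
  let new := pos ++ neg
  -- new[:i+1] with i from range(len(new)) is exactly take (i+1)
  let ans := (List.range new.length).map (fun i => (new.take (i + 1)).sum)
  let only_pos := ans.filter (fun num => decide (num > 0))
  (only_pos.length : Int)

-- ===== PORT B =====
def maxPosPrefixes_alt (arr : List Int) : Int :=
  let new := PySem.List.sorted (arr.filter (fun x => decide (x > 0))) (fun x => x) false ++
             PySem.List.sorted (arr.filter (fun x => decide (x ≤ 0))) (fun x => x) true
  (new.foldl (fun (s : Int × Int) x =>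
      let run := s.1 + x
      (run, if run > 0 then s.2 + 1 else s.2)) (0, 0)).2

-- ===== PRECONDITION & SPEC =====
def Spec_maxPosPrefixes (arr : List Int) (out : Int) : Prop := out = maxPosPrefixes_alt arr
instance (arr : List Int) (out : Int) : Decidable (Spec_maxPosPrefixes arr out) := by unfold Spec_maxPosPrefixes; infer_instance

-- ===== CLAIM (what is proved, stated in full; the proofs are below) =====
def Claim_equal_maxPosPrefixes : Prop := ∀ (arr : List Int), Dom_maxPosPrefixes arr → Spec_maxPosPrefixes arr (maxPosPrefixes arr)

-- ===== LEMMAS AND PROOFS =====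

-- the running-sum fold starting from (s, c) counts, above c, the positive shifted prefix sums
lemma fold_counts (l : List Int) : ∀ (s c : Int),
    (l.foldl (fun (st : Int × Int) x =>
        let run := st.1 + x
        (run, if run > 0 then st.2 + 1 else st.2)) (s, c)).2
      = c + (((List.range l.length).map (fun i => s + (l.take (i + 1)).sum)).filter
              (fun v => decide (v > 0))).length := by
  induction l with
  | nil => intro s c; simp
  | cons x t ih =>
    intro s c
    simp only [List.foldl_cons, List.length_cons, List.range_succ_eq_map, List.map_cons,
      List.map_map, List.filter_cons, List.take_succ_cons, List.take_zero, List.sum_cons,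
      List.sum_nil, add_zero, Function.comp_def]
    rw [ih (s + x)]
    have harg : ((List.range t.length).map (fun i => s + (x + (t.take (i + 1)).sum)))
         = (List.range t.length).map (fun i => s + x + (t.take (i + 1)).sum) := by
      apply List.map_congr_left; intro i _; ring
    rw [harg]
    by_cases h : s + x > 0
    · simp [h]; ring
    · simp [h]

-- ===== VERDICT (by name: the statement is the Claim_ definition above) =====
theorem maxPosPrefixes_spec : Claim_equal_maxPosPrefixes := by
  intro arr _
  unfold Spec_maxPosPrefixes maxPosPrefixes maxPosPrefixes_alt
  simp only []
  rw [fold_counts]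
  simp
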